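-- pv_equiv track=rewrite | github.com/ankitjain87/exercise | FAAMGU/unique.paths.py | unique_paths_count
-- ===== SOURCE A (Python) =====
-- def unique_paths_count(m, n):
--     """
--     1. Define the objective function
-- 		f(i, j) is the number of distinct ways to reach the i-th stair.
-- 	2. Identify base cases
-- 		f(1,1) = 1
-- 		f(2,2) = 2
-- 	3. Write down a recurrence relation for the optimized objective function
-- 		f(i, j) = f(i-1, j) + f(i, j-1)
-- 	4. What's the order of execution?
-- 		bottom-up
-- 	5. Where to look for the answer?
-- 		f(i, j)
--     """
--     dp = []
--     for i in range(m):
--         dp.append([0] * n)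
--
--     dp[0] = [1] * n
--     for i in range(m):
--         dp[i][0] = 1
--
--     for i in range(1, m):
--         for j in range(1, n):
--             dp[i][j] = dp[i-1][j] + dp[i][j-1]
--
--     return dp[m-1][n-1]
-- ===== SOURCE B (Python) =====
-- def unique_paths_count(m, n):
--     # Closed form: the answer is the binomial coefficient C(m+n-2, min(m,n)-1),
--     # computed by the exact multiplicative formula in O(min(m,n)) time and O(1) space.
--     k = min(m, n) - 1
--     total = m + n - 2
--     res = 1
--     for i in range(1, k + 1):
--         res = res * (total - k + i) // i
--     return res
-- ===== Notes on version B (the rewrite author's own statement) =====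
-- stated objective: faster
-- what changed: Replaces the O(m*n) dynamic-programming table with the closed-form binomial coefficient C(m+n-2, min(m,n)-1) computed by the exact multiplicative formula in O(min(m,n)) time and O(1) space.
import Mathlib
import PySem

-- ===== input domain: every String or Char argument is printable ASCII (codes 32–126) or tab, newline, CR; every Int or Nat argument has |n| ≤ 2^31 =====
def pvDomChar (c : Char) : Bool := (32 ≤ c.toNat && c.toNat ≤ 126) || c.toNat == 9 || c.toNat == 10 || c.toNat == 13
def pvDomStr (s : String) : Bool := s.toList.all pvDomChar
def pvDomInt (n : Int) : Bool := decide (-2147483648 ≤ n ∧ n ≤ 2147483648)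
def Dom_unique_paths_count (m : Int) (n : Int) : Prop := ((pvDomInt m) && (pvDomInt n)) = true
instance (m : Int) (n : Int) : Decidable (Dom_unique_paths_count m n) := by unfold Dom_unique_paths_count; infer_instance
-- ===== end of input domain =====

-- B replaces A's O(m*n) DP table with the closed-form binomial coefficient
-- C(m+n-2, min(m,n)-1) computed by the exact multiplicative formula (objective: faster).

-- ===== PORT A =====
-- literal transliteration of A's DP over a 2D list (rows built by append, cells updated by set)
def unique_paths_count (m : Int) (n : Int) : Int :=
  let dp : List (List Int) :=
    (PySem.List.pyRange 0 m 1).foldl (fun dp _ => dp ++ [List.replicate n.toNat 0]) []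
  let dp := dp.set 0 (List.replicate n.toNat 1)
  let dp := (PySem.List.pyRange 0 m 1).foldl
    (fun dp i => dp.set i.toNat ((dp.getD i.toNat []).set 0 1)) dp
  let dp := (PySem.List.pyRange 1 m 1).foldl (fun dp i =>
      (PySem.List.pyRange 1 n 1).foldl (fun dp j =>
        dp.set i.toNat ((dp.getD i.toNat []).set j.toNat
          ((dp.getD (i-1).toNat []).getD j.toNat 0 + (dp.getD i.toNat []).getD (j-1).toNat 0))) dp) dp
  (dp.getD (m-1).toNat []).getD (n-1).toNat 0

-- ===== PORT B =====
-- literal transliteration of Source B: multiplicative binomial formula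
def unique_paths_count_alt (m : Int) (n : Int) : Int :=
  let k := min m n - 1
  let total := m + n - 2
  (PySem.List.pyRange 1 (k + 1) 1).foldl
    (fun res i => PySem.Int.floordiv (res * (total - k + i)) i) 1

-- ===== PRECONDITION & SPEC =====
-- Pre_ excludes exactly the inputs m ≤ 0 or n ≤ 0, on which A raises IndexError.
def Pre_unique_paths_count (m : Int) (n : Int) : Prop := 1 ≤ m ∧ 1 ≤ n
instance (m : Int) (n : Int) : Decidable (Pre_unique_paths_count m n) := by
  unfold Pre_unique_paths_count; infer_instance
def pvWitness_unique_paths_count : Int × Int := (3, 4)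

def Spec_unique_paths_count (m : Int) (n : Int) (out : Int) : Prop := out = unique_paths_count_alt m n
instance (m : Int) (n : Int) (out : Int) : Decidable (Spec_unique_paths_count m n out) := by unfold Spec_unique_paths_count; infer_instance

-- ===== CLAIM (what is proved, stated in full; the proofs are below) =====
def Claim_equal_unique_paths_count : Prop := ∀ (m : Int) (n : Int), Dom_unique_paths_count m n → Pre_unique_paths_count m n → Spec_unique_paths_count m n (unique_paths_count m n)

-- ===== LEMMAS AND PROOFS =====

-- row i of the finished DP table: entry j is C(i+j, i)
def pascalRow (i N : Nat) : List Int := (List.range N).map (fun j => (Nat.choose (i + j) i : Int))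

-- the row every non-top row starts from: [1, 0, 0, ...]
def initRow (N : Nat) : List Int := (List.replicate N 0).set 0 1

lemma foldl_append_replicate {α : Type} (l : List Int) (r : α) (init : List α) :
    l.foldl (fun dp _ => dp ++ [r]) init = init ++ List.replicate l.length r := by
  induction l generalizing init with
  | nil => simp
  | cons x xs ih => simp [List.foldl_cons, ih, List.replicate_succ]

lemma foldl_set_head : ∀ (l₂ l₁ : List (List Int)),
    (PySem.List.pyRange (l₁.length) ((l₁.length : Int) + l₂.length) 1).foldl
      (fun dp i => dp.set i.toNat ((dp.getD i.toNat []).set 0 1)) (l₁ ++ l₂)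
    = l₁ ++ l₂.map (fun r => r.set 0 1) := by
  intro l₂
  induction l₂ with
  | nil => intro l₁; simp [PySem.List.pyRange_one_eq_nil]
  | cons r rest ih =>
    intro l₁
    rw [PySem.List.pyRange_one_cons (by simp)]
    simp only [List.foldl_cons]
    have hget : ((l₁ ++ r :: rest).getD ((l₁.length : Int)).toNat []) = r := by
      simp [List.getD]
    have hset : ∀ x, (l₁ ++ r :: rest).set ((l₁.length : Int)).toNat x = (l₁ ++ [x]) ++ rest := by
      intro x; simp [List.append_assoc]
    rw [hget, hset]
    have key := ih (l₁ ++ [r.set 0 1])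
    simp only [List.length_append, List.length_cons, List.length_nil, List.map_cons] at key ⊢
    push_cast at key ⊢
    rw [show ((l₁.length:Int) + ((rest.length:Int) + 1)) = (l₁.length:Int) + 1 + rest.length by ring] at ⊢
    rw [key]
    simp

-- L4: the inner loop only rewrites row i; reduce it to a fold on that row
lemma inner_to_row (i : Nat) (hi : 1 ≤ i) : ∀ (js : List Int) (dp : List (List Int)), i < dp.length →
    js.foldl (fun dp j => dp.set i ((dp.getD i []).set j.toNat
        ((dp.getD (i-1) []).getD j.toNat 0 + (dp.getD i []).getD (j-1).toNat 0))) dp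
    = dp.set i (js.foldl (fun row j => row.set j.toNat
        ((dp.getD (i-1) []).getD j.toNat 0 + row.getD (j-1).toNat 0)) (dp.getD i [])) := by
  intro js
  induction js with
  | nil =>
    intro dp hlen
    simp [List.getD, List.getElem?_eq_getElem hlen]
  | cons j js ih =>
    intro dp hlen
    simp only [List.foldl_cons]
    set x := (dp.getD i []).set j.toNat
        ((dp.getD (i-1) []).getD j.toNat 0 + (dp.getD i []).getD (j-1).toNat 0) with hx
    have hlen' : i < (dp.set i x).length := by simpa using hlen
    rw [ih (dp.set i x) hlen']
    have hprev : (dp.set i x).getD (i-1) [] = dp.getD (i-1) [] := by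
      simp [List.getD, List.getElem?_set_ne (by omega : i ≠ i - 1)]
    have hself : (dp.set i x).getD i [] = x := by
      simp [List.getD, hlen]
    rw [hprev, hself, List.set_set]

-- L5: the row fold builds the next Pascal row left to right
lemma row_fold (i N : Nat) (hN : 1 ≤ N) : ∀ (t : Nat), 1 ≤ t → t ≤ N →
    (PySem.List.pyRange 1 (t:Int) 1).foldl (fun row j => row.set j.toNat
        ((pascalRow i N).getD j.toNat 0 + row.getD (j-1).toNat 0)) (initRow N)
    = (List.range t).map (fun j => (Nat.choose (i+1+j) (i+1) : Int)) ++ List.replicate (N - t) 0 := by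
  intro t
  induction t with
  | zero => omega
  | succ t ih =>
    intro _ htN
    by_cases ht : t = 0
    · subst ht
      simp [PySem.List.pyRange_one_eq_nil, initRow, List.range_succ]
      cases N with
      | zero => omega
      | succ k => simp [List.replicate_succ]
    · have h1t : 1 ≤ t := by omega
      rw [show ((t+1 : Nat) : Int) = (t:Int) + 1 by push_cast; ring,
          PySem.List.pyRange_one_succ_right (by omega), List.foldl_append,
          ih h1t (by omega)]
      simp only [List.foldl_cons, List.foldl_nil]
      have hjt : ((t:Int)).toNat = t := by omega
      have hjt1 : ((t:Int) - 1).toNat = t - 1 := by omega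
      rw [hjt, hjt1]
      have hP : (pascalRow i N).getD t 0 = (Nat.choose (i+t) i : Int) := by
        simp [pascalRow, List.getD, (by omega : t < N)]
      have hR : ((List.range t).map (fun j => (Nat.choose (i+1+j) (i+1) : Int))
            ++ List.replicate (N - t) 0).getD (t-1) 0 = (Nat.choose (i+t) (i+1) : Int) := by
        rw [List.getD_append _ _ _ _ (by simp; omega)]
        simp [List.getD, (by omega : t - 1 < t)]
        norm_num [show i+1+(t-1) = i+t from by omega]
      rw [hP, hR]
      have hsum : (Nat.choose (i+t) i : Int) + (Nat.choose (i+t) (i+1) : Int)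
          = (Nat.choose (i+1+t) (i+1) : Int) := by
        have := Nat.choose_succ_succ (i+t) i
        push_cast [show i+1+t = (i+t)+1 by omega, this]
        ring
      rw [List.set_append_right _ _ (by simp)]
      simp only [List.length_map, List.length_range, Nat.sub_self]
      have hrep : (List.replicate (N - t) (0:Int)).set 0
            ((Nat.choose (i+t) i : Int) + (Nat.choose (i+t) (i+1) : Int))
          = (Nat.choose (i+1+t) (i+1) : Int) :: List.replicate (N - (t+1)) 0 := by
        rw [hsum]
        rw [show N - t = (N - (t+1)) + 1 by omega]
        simp [List.replicate_succ]
      rw [hrep, List.range_succ]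
      simp

-- L6: after outer iterations 1..t, the first t rows are Pascal rows
lemma outer_fold (M N : Nat) (hN : 1 ≤ N) : ∀ (t : Nat), 1 ≤ t → t ≤ M →
    (PySem.List.pyRange 1 (t:Int) 1).foldl (fun dp i =>
      (PySem.List.pyRange 1 (N:Int) 1).foldl (fun dp j =>
        dp.set i.toNat ((dp.getD i.toNat []).set j.toNat
          ((dp.getD (i-1).toNat []).getD j.toNat 0 + (dp.getD i.toNat []).getD (j-1).toNat 0))) dp)
      (pascalRow 0 N :: List.replicate (M-1) (initRow N))
    = (List.range t).map (fun r => pascalRow r N) ++ List.replicate (M - t) (initRow N) := by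
  intro t
  induction t with
  | zero => omega
  | succ t ih =>
    intro _ htM
    by_cases ht : t = 0
    · subst ht
      simp [PySem.List.pyRange_one_eq_nil, List.range_succ, pascalRow]
    · have h1t : 1 ≤ t := by omega
      rw [show ((t+1 : Nat) : Int) = (t:Int) + 1 by push_cast; ring,
          PySem.List.pyRange_one_succ_right (by omega), List.foldl_append,
          ih h1t (by omega)]
      simp only [List.foldl_cons, List.foldl_nil]
      set dpt := (List.range t).map (fun r => pascalRow r N) ++ List.replicate (M - t) (initRow N) with hdpt
      have hjt : ((t:Int)).toNat = t := by omega
      have hjt1 : ((t:Int) - 1).toNat = t - 1 := by omega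
      rw [hjt, hjt1]
      have hlen : t < dpt.length := by
        simp [hdpt]
        omega
      rw [inner_to_row t h1t _ dpt hlen]
      have hprev : dpt.getD (t-1) [] = pascalRow (t-1) N := by
        rw [hdpt, List.getD_append _ _ _ _ (by simp; omega)]
        simp [List.getD, (by omega : t - 1 < t)]
      have hself : dpt.getD t [] = initRow N := by
        rw [hdpt, List.getD_append_right _ _ _ _ (by simp)]
        simp only [List.length_map, List.length_range, Nat.sub_self]
        simp [List.getD, (by omega : 0 < M - t)]
      rw [hprev, hself, row_fold (t-1) N hN N hN le_rfl]
      have hrow : (List.range N).map (fun j => (Nat.choose (t-1+1+j) (t-1+1) : Int))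
            ++ List.replicate (N - N) 0 = pascalRow t N := by
        simp [pascalRow, (by omega : t - 1 + 1 = t)]
      rw [hrow]
      rw [hdpt, List.set_append_right _ _ (by simp)]
      simp only [List.length_map, List.length_range, Nat.sub_self]
      rw [show M - t = (M - (t+1)) + 1 by omega]
      simp [List.replicate_succ, List.range_succ]

lemma bfold (c : Nat) : ∀ (t : Nat),
    (PySem.List.pyRange 1 ((t:Int) + 1) 1).foldl
      (fun res i => PySem.Int.floordiv (res * ((c:Int) + i)) i) 1
    = (Nat.choose (c + t) t : Int) := by
  intro t
  induction t with
  | zero => simp [PySem.List.pyRange_one_eq_nil]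
  | succ t ih =>
    have h : PySem.List.pyRange 1 ((t:Int) + 1 + 1) 1
        = PySem.List.pyRange 1 ((t:Int) + 1) 1 ++ [(t:Int) + 1] := by
      have := PySem.List.pyRange_one_succ_right (a := 1) (b := (t:Int) + 1) (by omega)
      simpa using this
    push_cast
    rw [h, List.foldl_append]
    simp only [List.foldl_cons, List.foldl_nil]
    rw [show ((t:Int)+1) = ((t+1 : Nat) : Int) by push_cast; ring] at *
    rw [ih]
    have key : (c + t + 1) * Nat.choose (c + t) t = Nat.choose (c + t + 1) (t + 1) * (t + 1) :=
      Nat.add_one_mul_choose_eq (c + t) t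
    have : (Nat.choose (c + t) t : Int) * ((c:Int) + ((t+1:Nat):Int))
        = ((Nat.choose (c + t + 1) (t + 1) * (t + 1) : Nat) : Int) := by
      push_cast
      push_cast at key
      linarith [key]
    rw [this, PySem.Int.floordiv_natCast]
    simp
    rw [Nat.add_assoc]

lemma alt_eq (m n : Int) (hm : 1 ≤ m) (hn : 1 ≤ n) :
    unique_paths_count_alt m n
    = (Nat.choose (m.toNat + n.toNat - 2) (min m.toNat n.toNat - 1) : Int) := by
  unfold unique_paths_count_alt
  show (PySem.List.pyRange 1 ((min m n - 1) + 1) 1).foldl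
      (fun res i => PySem.Int.floordiv (res * ((m + n - 2) - (min m n - 1) + i)) i) 1 = _
  have hk : min m n - 1 + 1 = ((min m.toNat n.toNat - 1 : Nat) : Int) + 1 := by omega
  have hfun : (fun (res i : Int) => PySem.Int.floordiv (res * ((m + n - 2) - (min m n - 1) + i)) i)
      = fun (res i : Int) => PySem.Int.floordiv
          (res * (((m.toNat + n.toNat - 2 - (min m.toNat n.toNat - 1) : Nat) : Int) + i)) i := by
    funext res i
    congr 2
    omega
  rw [hk, hfun, bfold]
  congr 2
  omega

lemma pascalRow_zero (N : Nat) : pascalRow 0 N = List.replicate N 1 := by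
  simp [pascalRow]

lemma a_eq (M N : Nat) (hM1 : 1 ≤ M) (hN1 : 1 ≤ N) :
    unique_paths_count (M:Int) (N:Int)
    = (Nat.choose ((M - 1) + (N - 1)) (M - 1) : Int) := by
  unfold unique_paths_count
  -- step 1: build M zero rows
  rw [foldl_append_replicate, PySem.List.length_pyRange_one]
  simp only [List.nil_append, Int.sub_zero, Int.toNat_natCast]
  -- step 2: dp[0] = ones row
  rw [show List.replicate M (List.replicate N (0:Int))
        = List.replicate (M-1+1) (List.replicate N 0) from by rw [Nat.sub_add_cancel hM1],
      List.replicate_succ, List.set_cons_zero]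
  -- step 3: the dp[i][0] = 1 loop
  have h3 := foldl_set_head (List.replicate N 1 :: List.replicate (M-1) (List.replicate N 0)) []
  simp only [List.nil_append, List.length_nil, Nat.cast_zero, Int.zero_add,
    List.length_cons, List.length_replicate, Nat.sub_add_cancel hM1] at h3
  rw [h3]
  simp only [List.map_cons, List.map_replicate]
  have hones : (List.replicate N (1:Int)).set 0 1 = pascalRow 0 N := by
    rw [pascalRow_zero, show List.replicate N (1:Int) = List.replicate (N-1+1) 1 from by
          rw [Nat.sub_add_cancel hN1],
        List.replicate_succ, List.set_cons_zero, ← List.replicate_succ, Nat.sub_add_cancel hN1]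
  rw [hones]
  -- step 4: the main double loop
  rw [show ((List.replicate N (0:Int)).set 0 1) = initRow N from rfl]
  rw [outer_fold M N hN1 M hM1 le_rfl, Nat.sub_self]
  -- step 5: read off the final cell
  rw [show ((M:Int) - 1).toNat = M - 1 from by omega,
      show ((N:Int) - 1).toNat = N - 1 from by omega]
  rw [List.getD_append _ _ _ _ (by simp; omega)]
  simp [List.getD, (by omega : M - 1 < M), pascalRow, (by omega : N - 1 < N)]

lemma ports_agree (m n : Int) (hm : 1 ≤ m) (hn : 1 ≤ n) :
    unique_paths_count m n = unique_paths_count_alt m n := by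
  obtain ⟨M, rfl⟩ : ∃ M : Nat, m = (M:Int) := ⟨m.toNat, by omega⟩
  obtain ⟨N, rfl⟩ : ∃ N : Nat, n = (N:Int) := ⟨n.toNat, by omega⟩
  have hM1 : 1 ≤ M := by omega
  have hN1 : 1 ≤ N := by omega
  rw [a_eq M N hM1 hN1, alt_eq _ _ hm hn]
  simp only [Int.toNat_natCast]
  norm_cast
  rcases le_total M N with h | h
  · rw [min_eq_left h]
    congr 1
    omega
  · rw [min_eq_right h, show M - 1 + (N - 1) = M + N - 2 from by omega]
    rw [show N - 1 = (M + N - 2) - (M - 1) from by omega]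
    rw [Nat.choose_symm (by omega)]

-- ===== VERDICT (by name: the statement is the Claim_ definition above) =====
theorem unique_paths_count_spec : Claim_equal_unique_paths_count := by
  intro m n _ hpre
  unfold Spec_unique_paths_count
  exact ports_agree m n hpre.1 hpre.2
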